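-- pv_equiv track=rewrite | github.com/camper0008/strip-cl-errors | sclerr/linker.py | cull_angle_brackets
-- ===== SOURCE A (Python) =====
-- def cull_angle_brackets(line: str, depth: int) -> str:
--     open_brackets = []
--     brackets: list[tuple[int, int]] = []
--     for i, ch in enumerate(line):
--         if ch == "<":
--             open_brackets.append(i)
--         if ch == ">":
--             start = open_brackets.pop()
--             if len(open_brackets) == depth:
--                 brackets.insert(0, (start, i))
--     for start, end in brackets:
--         line = line[:start] + "<..>" + line[end + 1 :]
--     return line
-- ===== SOURCE B (Python) =====
-- def cull_angle_brackets(line: str, depth: int) -> str: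
--     parts = []
--     d = 0
--     seg_start = 0
--     pair_start = None
--     for i, ch in enumerate(line):
--         if ch == "<":
--             if d == depth and pair_start is None:
--                 pair_start = i
--             d += 1
--         elif ch == ">":
--             d -= 1
--             if d == depth and pair_start is not None:
--                 parts.append(line[seg_start:pair_start])
--                 parts.append("<..>")
--                 seg_start = i + 1
--                 pair_start = None
--     parts.append(line[seg_start:])
--     return "".join(parts)
-- ===== Notes on version B (the rewrite author's own statement) =====
-- stated objective: alternative
-- what changed: A collects bracket pairs with a stack plus brackets.insert(0,...) and then re-splices the whole string once per pair (line = line[:start] + '<..>' + line[end+1:]); B does a single left-to-right pass with a depth counter that emits the untouched segments and the '<..>' markers into a list joined once at the end.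
import Mathlib
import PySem

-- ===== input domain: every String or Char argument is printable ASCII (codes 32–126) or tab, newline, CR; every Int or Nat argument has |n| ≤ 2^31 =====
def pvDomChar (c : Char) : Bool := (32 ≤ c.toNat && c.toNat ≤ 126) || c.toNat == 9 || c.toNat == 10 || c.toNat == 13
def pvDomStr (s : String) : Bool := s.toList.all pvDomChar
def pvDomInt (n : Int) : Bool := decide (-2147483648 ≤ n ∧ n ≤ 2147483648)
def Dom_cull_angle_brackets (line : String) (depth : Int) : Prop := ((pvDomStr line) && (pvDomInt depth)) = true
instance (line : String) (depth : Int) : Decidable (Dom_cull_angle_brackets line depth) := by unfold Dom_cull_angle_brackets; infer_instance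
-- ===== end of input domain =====

-- B replaces A's collect-then-splice (stack + brackets.insert(0,..), then one full-string re-splice
-- per pair) by a single left-to-right pass with a depth counter that emits the segments and joins them once.

-- ===== PORT A =====
-- for start, end in brackets: line = line[:start] + "<..>" + line[end+1:]
def cullA_step (l : List Char) (q : Int × Int) : List Char :=
  PySem.List.slice l none (some q.1) ++ "<..>".toList ++ PySem.List.slice l (some (q.2 + 1)) none

-- the first loop of A: stack of open positions, pairs collected via brackets.insert(0, …);
-- open_brackets.pop() on an empty stack is Python's IndexError → none
def cullA_scan (depth : Int) : List (Int × Char) → List Int → List (Int × Int) → Option (List Int × List (Int × Int))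
  | [], ob, br => some (ob, br)
  | (i, ch) :: rest, ob, br =>
    let ob1 := if ch = '<' then ob ++ [i] else ob
    if ch = '>' then
      match PySem.List.pop? ob1 with
      | none => none
      | some (start, ob2) =>
          cullA_scan depth rest ob2
            (if (ob2.length : Int) = depth then PySem.List.insert br 0 (start, i) else br)
    else
      cullA_scan depth rest ob1 br

def cull_angle_brackets (line : String) (depth : Int) : String :=
  match cullA_scan depth (PySem.List.enumerate line.toList 0) [] [] with
  | none => line   -- unreachable under Pre_ (Python raises IndexError here)
  | some (_, br) => String.ofList (br.foldl cullA_step line.toList)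

-- ===== PORT B =====
-- one pass: d = current depth, seg = start of the pending untouched segment,
-- ps = start of the currently open depth-level pair (if any); parts collects the output pieces
def cullB_scan (cs : List Char) (depth : Int) :
    List (Int × Char) → List (List Char) → Int → Int → Option Int → (List (List Char) × Int)
  | [], parts, _, seg, _ => (parts, seg)
  | (i, ch) :: rest, parts, d, seg, ps =>
    if ch = '<' then
      cullB_scan cs depth rest parts (d + 1) seg (if d = depth ∧ ps = none then some i else ps)
    else if ch = '>' then
      match ps with
      | some s =>
          if d - 1 = depth then
            cullB_scan cs depth rest
              (parts ++ [PySem.List.slice cs (some seg) (some s), "<..>".toList]) (d - 1) (i + 1) none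
          else cullB_scan cs depth rest parts (d - 1) seg ps
      | none => cullB_scan cs depth rest parts (d - 1) seg ps
    else
      cullB_scan cs depth rest parts d seg ps

def cull_angle_brackets_alt (line : String) (depth : Int) : String :=
  let cs := line.toList
  let r := cullB_scan cs depth (PySem.List.enumerate cs 0) [] 0 0 none
  String.ofList ((r.1 ++ [PySem.List.slice cs (some r.2) none]).flatten)

-- ===== PRECONDITION & SPEC =====
-- Pre_ excludes exactly the inputs where some prefix closes more '>' than it has opened '<':
-- there A's open_brackets.pop() raises IndexError (Python returns no value).
def Pre_cull_angle_brackets (line : String) (depth : Int) : Prop :=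
  ∀ n : Nat, n ≤ line.toList.length →
    (line.toList.take n).count '>' ≤ (line.toList.take n).count '<'
instance (line : String) (depth : Int) : Decidable (Pre_cull_angle_brackets line depth) := by
  unfold Pre_cull_angle_brackets; infer_instance

def pvWitness_cull_angle_brackets : String × Int := ("a<b<c>d>e", 0)

def Spec_cull_angle_brackets (line : String) (depth : Int) (out : String) : Prop :=
  out = cull_angle_brackets_alt line depth
instance (line : String) (depth : Int) (out : String) : Decidable (Spec_cull_angle_brackets line depth out) := by
  unfold Spec_cull_angle_brackets; infer_instance

-- ===== CLAIM (what is proved, stated in full; the proofs are below) =====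
def Claim_equal_cull_angle_brackets : Prop := ∀ (line : String) (depth : Int), Dom_cull_angle_brackets line depth → Pre_cull_angle_brackets line depth → Spec_cull_angle_brackets line depth (cull_angle_brackets line depth)

-- ===== LEMMAS AND PROOFS =====

-- splicing pairs that all lie strictly inside A does not look at B
lemma foldl_step_append (br : List (Int × Int)) :
    ∀ (A B : List Char), (∀ q ∈ br, 0 ≤ q.1 ∧ q.1 ≤ q.2 ∧ q.2 + 1 ≤ (A.length : Int)) →
    List.Pairwise (fun a b : Int × Int => b.2 < a.1) br →
      br.foldl cullA_step (A ++ B) = br.foldl cullA_step A ++ B := by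
  induction br with
  | nil => intro A B _ _; rfl
  | cons q br ih =>
    intro A B hb hp
    obtain ⟨hq0, hq12, hq2⟩ := hb q (by simp)
    have hsA : q.1.toNat ≤ A.length := by omega
    have heA : (q.2 + 1).toNat ≤ A.length := by omega
    have hstep : cullA_step (A ++ B) q = cullA_step A q ++ B := by
      unfold cullA_step
      rw [PySem.List.slice_to _ hq0, PySem.List.slice_to _ hq0,
          PySem.List.slice_from _ (by omega : (0:Int) ≤ q.2 + 1),
          PySem.List.slice_from _ (by omega : (0:Int) ≤ q.2 + 1)]
      rw [List.take_append_of_le_length hsA, List.drop_append_of_le_length heA]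
      simp
    rw [List.foldl_cons, List.foldl_cons, hstep]
    have hlen : q.1.toNat ≤ (cullA_step A q).length := by
      unfold cullA_step
      rw [PySem.List.slice_to _ hq0, PySem.List.slice_from _ (by omega : (0:Int) ≤ q.2 + 1)]
      simp
      omega
    refine ih (cullA_step A q) B ?_ hp.of_cons
    intro q' hq'
    obtain ⟨h0, h12, _⟩ := hb q' (by simp [hq'])
    have hlt : q'.2 < q.1 := (List.pairwise_cons.mp hp).1 q' hq'
    have : ((cullA_step A q).length : Int) ≥ q.1 := by
      have := hlen
      omega
    exact ⟨h0, h12, by omega⟩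

-- closing a depth-level pair (s, e): splice it now, on the already-spliced prefix
lemma key_step (cs : List Char) (br : List (Int × Int)) (parts : List (List Char))
    (seg s e : Int)
    (hseg0 : 0 ≤ seg) (hss : seg ≤ s) (hse : s ≤ e) (hel : e < (cs.length : Int))
    (hbr : ∀ q ∈ br, 0 ≤ q.1 ∧ q.1 ≤ q.2 ∧ q.2 + 1 ≤ seg)
    (hpair : List.Pairwise (fun a b : Int × Int => b.2 < a.1) br)
    (hinv : br.foldl cullA_step cs = parts.flatten ++ cs.drop seg.toNat) :
    ((s, e) :: br).foldl cullA_step cs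
      = (parts ++ [PySem.List.slice cs (some seg) (some s), "<..>".toList]).flatten
          ++ cs.drop (e + 1).toNat := by
  have h0s : (0:Int) ≤ s := le_trans hseg0 hss
  have hsl : s.toNat ≤ cs.length := by omega
  have hboundS : ∀ q ∈ br, 0 ≤ q.1 ∧ q.1 ≤ q.2 ∧ q.2 + 1 ≤ ((cs.take s.toNat).length : Int) := by
    intro q hq
    obtain ⟨h0, h12, h2⟩ := hbr q hq
    refine ⟨h0, h12, ?_⟩
    rw [List.length_take]
    omega
  -- decompose the invariant at position s
  have hsplit : br.foldl cullA_step (cs.take s.toNat) ++ cs.drop s.toNat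
      = parts.flatten ++ cs.drop seg.toNat := by
    rw [← foldl_step_append br (cs.take s.toNat) (cs.drop s.toNat) hboundS hpair,
        List.take_append_drop, hinv]
  have hdropsplit : cs.drop seg.toNat
      = (cs.drop seg.toNat).take (s.toNat - seg.toNat) ++ cs.drop s.toNat := by
    have h1 : cs.drop s.toNat = (cs.drop seg.toNat).drop (s.toNat - seg.toNat) := by
      rw [List.drop_drop]
      congr 1
      omega
    rw [h1, List.take_append_drop]
  have hpre2 : br.foldl cullA_step (cs.take s.toNat)
      = parts.flatten ++ (cs.drop seg.toNat).take (s.toNat - seg.toNat) := by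
    apply List.append_cancel_right (bs := cs.drop s.toNat)
    rw [hsplit, List.append_assoc, ← hdropsplit]
  -- now compute the new fold
  rw [List.foldl_cons]
  have hstep : cullA_step cs (s, e)
      = (cs.take s.toNat ++ "<..>".toList) ++ cs.drop (e + 1).toNat := by
    unfold cullA_step
    rw [PySem.List.slice_to _ h0s, PySem.List.slice_from _ (by omega : (0:Int) ≤ e + 1)]
  rw [hstep]
  have hlen1 : ∀ q ∈ br, 0 ≤ q.1 ∧ q.1 ≤ q.2 ∧ q.2 + 1 ≤ ((cs.take s.toNat ++ "<..>".toList).length : Int) := by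
    intro q hq
    obtain ⟨h0, h12, h2⟩ := hbr q hq
    refine ⟨h0, h12, ?_⟩
    rw [List.length_append, List.length_take]
    omega
  rw [foldl_step_append br _ _ hlen1 hpair,
      foldl_step_append br _ _ hboundS hpair, hpre2]
  rw [PySem.List.slice_toNat _ hseg0 h0s]
  simp [List.flatten_append]

-- the simultaneous scan invariant: A's (stack, pairs) state and B's (parts, depth, seg, pending) state
lemma scan_agree (cs : List Char) (depth : Int)
    (hpre : ∀ n : Nat, n ≤ cs.length → (cs.take n).count '>' ≤ (cs.take n).count '<') :
    ∀ (l : List Char) (k : Nat), cs.drop k = l →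
    ∀ (ob : List Int) (br : List (Int × Int)) (parts : List (List Char)) (seg : Int) (ps : Option Int),
      ((ob.length : Int) = ((cs.take k).count '<' : Int) - ((cs.take k).count '>' : Int)) →
      (∀ x ∈ ob, 0 ≤ x ∧ x < (k : Int)) →
      (ps = if 0 ≤ depth then ob[depth.toNat]? else none) →
      (∀ s, ps = some s → seg ≤ s) →
      (0 ≤ seg ∧ seg ≤ (k : Int)) →
      (∀ q ∈ br, 0 ≤ q.1 ∧ q.1 ≤ q.2 ∧ q.2 + 1 ≤ seg) →
      List.Pairwise (fun a b : Int × Int => b.2 < a.1) br →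
      (br.foldl cullA_step cs = parts.flatten ++ cs.drop seg.toNat) →
      ∃ obf brf,
        cullA_scan depth (PySem.List.enumerate l (k : Int)) ob br = some (obf, brf) ∧
        0 ≤ (cullB_scan cs depth (PySem.List.enumerate l (k : Int)) parts (ob.length : Int) seg ps).2 ∧
        brf.foldl cullA_step cs =
          (cullB_scan cs depth (PySem.List.enumerate l (k : Int)) parts (ob.length : Int) seg ps).1.flatten ++
            cs.drop (cullB_scan cs depth (PySem.List.enumerate l (k : Int)) parts (ob.length : Int) seg ps).2.toNat := by
  intro l
  induction l with
  | nil =>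
    intro k _ ob br parts seg ps _ _ _ _ hseg _ _ hinv
    rw [PySem.List.enumerate_nil]
    exact ⟨ob, br, rfl, hseg.1, hinv⟩
  | cons c l' ih =>
    intro k hlk ob br parts seg ps hcnt hob hps hpsb hseg hbr hpair hinv
    have hk : k < cs.length := by
      have h := congrArg List.length hlk
      simp only [List.length_drop, List.length_cons] at h
      omega
    have hdk : c :: l' = cs[k] :: cs.drop (k + 1) := by
      rw [← hlk, List.drop_eq_getElem_cons hk]
    have hck : cs[k] = c := by injection hdk with a b; exact a.symm
    have hdrop1 : cs.drop (k + 1) = l' := by injection hdk with a b; exact b.symm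
    have htake : cs.take (k + 1) = cs.take k ++ [c] := by
      rw [List.take_add_one]
      simp [List.getElem?_eq_getElem hk, hck]
    have hknat : ((k : Int) + 1) = ((k + 1 : Nat) : Int) := by push_cast; ring
    rw [PySem.List.enumerate_cons]
    by_cases hlt : c = '<'
    · -- push
      subst hlt
      have hA1 : cullA_scan depth (((k:Int), '<') :: PySem.List.enumerate l' ((k:Int)+1)) ob br
          = cullA_scan depth (PySem.List.enumerate l' ((k:Int)+1)) (ob ++ [(k:Int)]) br := by
        simp [cullA_scan]
      have hB1 : cullB_scan cs depth (((k:Int), '<') :: PySem.List.enumerate l' ((k:Int)+1)) parts (ob.length : Int) seg ps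
          = cullB_scan cs depth (PySem.List.enumerate l' ((k:Int)+1)) parts ((ob.length : Int) + 1) seg
              (if (ob.length : Int) = depth ∧ ps = none then some (k:Int) else ps) := by
        simp [cullB_scan]
      rw [hA1, hB1]
      have harg : ((ob.length : Int) + 1) = (((ob ++ [(k : Int)]).length : Int)) := by simp
      rw [hknat, harg]
      apply ih (k + 1) hdrop1
      · rw [htake]
        simp only [List.count_append]
        simp
        push_cast
        omega
      · intro x hx
        rcases List.mem_append.mp hx with h | h
        · obtain ⟨h0, h1⟩ := hob x h
          exact ⟨h0, by push_cast; omega⟩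
        · simp at h
          subst h
          exact ⟨Int.natCast_nonneg _, by push_cast; omega⟩
      · -- ps invariant after push
        by_cases hcond : (ob.length : Int) = depth ∧ ps = none
        · rw [if_pos hcond]
          obtain ⟨hd, _⟩ := hcond
          have hd0 : 0 ≤ depth := hd ▸ Int.natCast_nonneg _
          rw [if_pos hd0]
          have hdt : depth.toNat = ob.length := by omega
          rw [hdt]
          simp
        · rw [if_neg hcond]
          rw [hps]
          by_cases hd0 : 0 ≤ depth
          · rw [if_pos hd0, if_pos hd0]
            rcases Nat.lt_trichotomy depth.toNat ob.length with h | h | h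
            · rw [List.getElem?_append_left h]
            · exfalso
              apply hcond
              refine ⟨by omega, ?_⟩
              rw [hps, if_pos hd0, h]
              simp
            · rw [List.getElem?_eq_none (by omega), List.getElem?_eq_none (by simp; omega)]
          · rw [if_neg hd0, if_neg hd0]
      · intro s hs
        by_cases hcond : (ob.length : Int) = depth ∧ ps = none
        · rw [if_pos hcond] at hs
          injection hs with hs
          omega
        · rw [if_neg hcond] at hs
          exact hpsb s hs
      · exact ⟨hseg.1, by push_cast; omega⟩
      · exact hbr
      · exact hpair
      · exact hinv
    · by_cases hgt : c = '>'
      · -- pop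
        subst hgt
        have hlen0 : 0 < ob.length := by
          have hp := hpre (k + 1) (by omega)
          rw [htake] at hp
          simp only [List.count_append] at hp
          simp at hp
          omega
        have hne : ob ≠ [] := List.ne_nil_of_length_pos hlen0
        obtain ⟨obI, sL, hdecomp⟩ : ∃ obI sL, ob = obI ++ [sL] :=
          ⟨ob.dropLast, ob.getLast hne, (List.dropLast_append_getLast hne).symm⟩
        subst hdecomp
        obtain ⟨hsL0, hsLk⟩ := hob sL (by simp)
        have hA1 : cullA_scan depth (((k:Int), '>') :: PySem.List.enumerate l' ((k:Int)+1)) (obI ++ [sL]) br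
            = cullA_scan depth (PySem.List.enumerate l' ((k:Int)+1)) obI
                (if (obI.length : Int) = depth then PySem.List.insert br 0 (sL, (k:Int)) else br) := by
          have hf : (('>':Char) = '<') = False := by decide
          have ht : (('>':Char) = '>') = True := by decide
          simp only [cullA_scan, hf, ht, if_true, if_false, PySem.List.pop?_last]
        have hcnt' : ((obI.length : Int)) = ((cs.take (k+1)).count '<' : Int) - ((cs.take (k+1)).count '>' : Int) := by
          rw [htake]
          simp only [List.count_append]
          simp at hcnt ⊢
          push_cast at hcnt ⊢
          omega
        by_cases heq : (obI.length : Int) = depth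
        · -- a depth-level pair closes here
          have hd0 : 0 ≤ depth := heq ▸ Int.natCast_nonneg _
          have hdt : depth.toNat = obI.length := by omega
          have hpss : ps = some sL := by
            rw [hps, if_pos hd0, hdt, List.getElem?_append_right (le_refl _)]
            simp
          have hsegs : seg ≤ sL := hpsb sL hpss
          have hB1 : cullB_scan cs depth (((k:Int), '>') :: PySem.List.enumerate l' ((k:Int)+1)) parts ((obI ++ [sL]).length : Int) seg ps
              = cullB_scan cs depth (PySem.List.enumerate l' ((k:Int)+1))
                  (parts ++ [PySem.List.slice cs (some seg) (some sL), "<..>".toList])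
                  (((obI ++ [sL]).length : Int) - 1) ((k:Int) + 1) none := by
            rw [hpss]
            have hf : (('>':Char) = '<') = False := by decide
            have ht : (('>':Char) = '>') = True := by decide
            have hc : ((((obI ++ [sL]).length : Int) - 1 = depth)) = True := eq_true (by
              simp only [List.length_append, List.length_cons, List.length_nil]
              push_cast
              omega)
            simp only [cullB_scan, hf, ht, hc, if_true, if_false]
          rw [hA1, hB1, if_pos heq, PySem.List.insert_zero]
          have hinv' := key_step cs br parts seg sL (k : Int) hseg.1 hsegs (by omega)
            (by push_cast; omega) hbr hpair hinv
          have hcast : (((obI ++ [sL]).length : Int) - 1) = ((obI.length : Int)) := by simp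
          rw [hknat, hcast]
          apply ih (k + 1) hdrop1
          · exact hcnt'
          · intro x hx
            obtain ⟨h0, h1⟩ := hob x (by simp [hx])
            exact ⟨h0, by push_cast; omega⟩
          · rw [if_pos hd0, hdt]
            simp
          · intro s hs
            simp at hs
          · constructor
            · push_cast; omega
            · push_cast; omega
          · intro q hq
            rcases List.mem_cons.mp hq with h | h
            · subst h
              exact ⟨hsL0, by omega, by push_cast; omega⟩
            · obtain ⟨h0, h12, h2⟩ := hbr q h
              exact ⟨h0, h12, by push_cast; omega⟩
          · exact List.Pairwise.cons (fun q hq => by have := (hbr q hq).2.2; omega) hpair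
          · rw [hinv']
            have h12 : ((k:Int) + 1).toNat = (((k + 1 : Nat) : Int)).toNat := by omega
            rw [h12]
        · -- pop at a different depth: nothing recorded
          have hB1 : cullB_scan cs depth (((k:Int), '>') :: PySem.List.enumerate l' ((k:Int)+1)) parts ((obI ++ [sL]).length : Int) seg ps
              = cullB_scan cs depth (PySem.List.enumerate l' ((k:Int)+1)) parts
                  (((obI ++ [sL]).length : Int) - 1) seg ps := by
            have hf : (('>':Char) = '<') = False := by decide
            have ht : (('>':Char) = '>') = True := by decide
            have hc : ((((obI ++ [sL]).length : Int) - 1 = depth)) = False := eq_false (by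
              simp only [List.length_append, List.length_cons, List.length_nil]
              push_cast
              omega)
            simp only [cullB_scan, hf, ht, hc, if_true, if_false]
            cases ps <;> rfl
          rw [hA1, hB1, if_neg heq]
          have hcast : (((obI ++ [sL]).length : Int) - 1) = ((obI.length : Int)) := by simp
          rw [hknat, hcast]
          apply ih (k + 1) hdrop1
          · exact hcnt'
          · intro x hx
            obtain ⟨h0, h1⟩ := hob x (by simp [hx])
            exact ⟨h0, by push_cast; omega⟩
          · rw [hps]
            by_cases hd0 : 0 ≤ depth
            · rw [if_pos hd0, if_pos hd0]
              by_cases hlow : depth.toNat < obI.length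
              · rw [List.getElem?_append_left hlow]
              · have h2 : obI.length + 1 ≤ depth.toNat := by omega
                have h3 : (obI ++ [sL]).length ≤ depth.toNat := by
                  simp only [List.length_append, List.length_cons, List.length_nil]
                  omega
                have h4 : obI[depth.toNat]? = (none : Option Int) :=
                  List.getElem?_eq_none (by omega)
                have h5 : (obI ++ [sL])[depth.toNat]? = (none : Option Int) :=
                  List.getElem?_eq_none h3
                rw [h4, h5]
            · rw [if_neg hd0, if_neg hd0]
          · exact hpsb
          · exact ⟨hseg.1, by push_cast; omega⟩
          · exact hbr
          · exact hpair
          · exact hinv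
      · -- ordinary character
        have hA1 : cullA_scan depth (((k:Int), c) :: PySem.List.enumerate l' ((k:Int)+1)) ob br
            = cullA_scan depth (PySem.List.enumerate l' ((k:Int)+1)) ob br := by
          simp only [cullA_scan]
          rw [if_neg hlt, if_neg hgt]
        have hB1 : cullB_scan cs depth (((k:Int), c) :: PySem.List.enumerate l' ((k:Int)+1)) parts (ob.length : Int) seg ps
            = cullB_scan cs depth (PySem.List.enumerate l' ((k:Int)+1)) parts (ob.length : Int) seg ps := by
          simp only [cullB_scan]
          rw [if_neg hlt, if_neg hgt]
        rw [hA1, hB1, hknat]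
        apply ih (k + 1) hdrop1
        · rw [htake]
          simp only [List.count_append]
          simp [List.count_singleton', hlt, hgt]
          push_cast
          omega
        · intro x hx
          obtain ⟨h0, h1⟩ := hob x hx
          exact ⟨h0, by push_cast; omega⟩
        · exact hps
        · exact hpsb
        · exact ⟨hseg.1, by push_cast; omega⟩
        · exact hbr
        · exact hpair
        · exact hinv

-- ===== VERDICT (by name: the statement is the Claim_ definition above) =====
theorem cull_angle_brackets_spec : Claim_equal_cull_angle_brackets := by
  unfold Claim_equal_cull_angle_brackets
  intro line depth _ hpre
  unfold Spec_cull_angle_brackets cull_angle_brackets cull_angle_brackets_alt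
  obtain ⟨obf, brf, hA, hnn, hEq⟩ :=
    scan_agree line.toList depth hpre line.toList 0 (by simp) [] [] [] 0 none
      (by simp) (by simp) (by simp) (by simp) (by simp) (by simp) (by simp) (by simp)
  have h0 : ((0 : Nat) : Int) = (0 : Int) := rfl
  rw [h0] at hA hEq hnn
  simp only [List.length_nil, Nat.cast_zero] at hA hEq hnn
  rw [hA]
  dsimp only
  rw [hEq, List.flatten_append, PySem.List.slice_from _ hnn]
  simp
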